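-- pv_equiv track=rewrite | github.com/xfious/dearth | distill_util.py | split_batch_config
-- ===== SOURCE A (Python) =====
-- def split_batch_config(
--     batch_size,
--     teacher_names: list,
--     student_names: list,
-- ):
--     '''
--     return: teacher_send_config, student_recv_config
--         the two config is used to split batch
--         teacher_send_config: {key: teacher_name, value: list[(s_name, (start_idx, end_idx))]}
--         student_recv_config: {key: student_name, value: list[t_name]}
--     '''
--     n_student = len(student_names)
--     n_teacher = len(teacher_names)
--     assert batch_size % n_student == 0, f"{batch_size} % {n_student} != 0"
--     if n_teacher != 0:
--         assert batch_size % n_teacher == 0, f"{batch_size} % {n_teacher} != 0"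
--     batch_per_student = batch_size // n_student
--     batch_per_teacher = batch_size // max(n_teacher, 1)
--
--     teacher_send_config = {} # teacher_name -> list[(s_name, (start_idx, end_idx))]
--     student_recv_config = {} # student_name -> list[t_name]
--
--     for s_names in student_names:
--         student_recv_config[s_names] = []
--
--     s_i = 0
--     s_remain = batch_per_student
--     teacher_batch_start_idx = 0
--     for t_i, t_name in enumerate(teacher_names):
--         assigned_cnt = 0
--         tmp_t_config = []
--         while assigned_cnt < batch_per_teacher:
--             s_name = student_names[s_i]
--             start_idx = assigned_cnt
--             end_idx = start_idx + s_remain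
--             if end_idx > batch_per_teacher:
--                 end_idx = batch_per_teacher
--             s_remain -= (end_idx - start_idx)
--
--             if s_name not in student_recv_config:
--                 student_recv_config[s_name] = []
--             student_recv_config[s_name].append(t_name)
--             tmp_t_config.append((s_name, (start_idx, end_idx)))
--             assigned_cnt += (end_idx - start_idx)
--
--             if s_remain == 0:
--                 s_i += 1
--                 s_remain = batch_per_student
--         teacher_send_config[t_name] = tmp_t_config
--         teacher_batch_start_idx += batch_per_teacher
--
--     return teacher_send_config, student_recv_config
-- ===== SOURCE B (Python) =====
-- def split_batch_config(
--     batch_size,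
--     teacher_names: list,
--     student_names: list,
-- ):
--     n_student = len(student_names)
--     n_teacher = len(teacher_names)
--     assert batch_size % n_student == 0, f"{batch_size} % {n_student} != 0"
--     if n_teacher != 0:
--         assert batch_size % n_teacher == 0, f"{batch_size} % {n_teacher} != 0"
--     batch_per_student = batch_size // n_student
--     batch_per_teacher = batch_size // max(n_teacher, 1)
--
--     teacher_send_config = {}
--     student_recv_config = {name: [] for name in student_names}
--
--     for t, t_name in enumerate(teacher_names):
--         lo = t * batch_per_teacher
--         hi = lo + batch_per_teacher
--         cfg = []
--         for s, s_name in enumerate(student_names):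
--             start = max(lo, s * batch_per_student)
--             end = min(hi, (s + 1) * batch_per_student)
--             if start < end:
--                 cfg.append((s_name, (start - lo, end - lo)))
--                 student_recv_config[s_name].append(t_name)
--         teacher_send_config[t_name] = cfg
--     return teacher_send_config, student_recv_config
-- ===== Notes on version B (the rewrite author's own statement) =====
-- stated objective: alternative
-- what changed: Replaces A's running-remainder sweep over a shared (student index, remainder) state threaded through the teacher loop by an independent per-teacher computation: each segment is the intersection of the teacher's global index range [t*bpt,(t+1)*bpt) with each student's global chunk [s*bps,(s+1)*bps), mapped to teacher-relative coordinates.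
import Mathlib
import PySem

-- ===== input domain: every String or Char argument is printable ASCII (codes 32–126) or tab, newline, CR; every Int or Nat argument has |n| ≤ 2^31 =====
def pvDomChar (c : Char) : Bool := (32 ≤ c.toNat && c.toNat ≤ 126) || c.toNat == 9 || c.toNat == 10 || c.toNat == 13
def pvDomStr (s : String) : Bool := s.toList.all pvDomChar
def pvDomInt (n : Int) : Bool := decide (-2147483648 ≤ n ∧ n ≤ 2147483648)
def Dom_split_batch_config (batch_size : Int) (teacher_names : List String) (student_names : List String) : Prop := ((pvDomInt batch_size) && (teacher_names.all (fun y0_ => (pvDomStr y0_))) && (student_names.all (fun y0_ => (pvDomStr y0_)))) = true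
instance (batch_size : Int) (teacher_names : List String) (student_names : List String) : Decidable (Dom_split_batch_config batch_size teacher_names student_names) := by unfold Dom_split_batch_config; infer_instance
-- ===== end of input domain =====

-- B replaces A's running-remainder sweep over a shared (student index, remainder) state by computing,
-- per teacher, the intersection of the teacher's global index range with each student's global chunk
-- (objective: alternative decomposition, same cost).

-- ===== PORT A =====
-- A's inner while-loop; the fuel argument is only a totality guard (the loop terminates on every
-- input Pre_ admits, and the caller passes enough fuel for every such input).
def pyA_inner (students : List String) (t_name : String) (bpt bps : Int) :
    Nat → Int → Int → Int → List (String × (Int × Int)) → PySem.Dict String (List String) →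
    List (String × (Int × Int)) × PySem.Dict String (List String) × Int × Int
  | 0, _, s_i, s_remain, tmp, recv => (tmp, recv, s_i, s_remain)
  | fuel + 1, assigned, s_i, s_remain, tmp, recv =>
    if assigned < bpt then
      -- students[s_i]: in range on every input Pre_ admits (IndexError is unreachable there)
      let s_name := (PySem.List.pyGet? students s_i).getD ""
      let start_idx := assigned
      let end_idx := if start_idx + s_remain > bpt then bpt else start_idx + s_remain
      let s_remain' := s_remain - (end_idx - start_idx)
      let recv' := if recv.contains s_name then recv else recv.insert s_name []
      let recv'' := recv'.modify s_name [] (fun l => l ++ [t_name])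
      let tmp' := tmp ++ [(s_name, (start_idx, end_idx))]
      let assigned' := assigned + (end_idx - start_idx)
      if s_remain' = 0 then
        pyA_inner students t_name bpt bps fuel assigned' (s_i + 1) bps tmp' recv''
      else
        pyA_inner students t_name bpt bps fuel assigned' s_i s_remain' tmp' recv''
    else (tmp, recv, s_i, s_remain)

def pyA_outer (students : List String) (bpt bps : Int) :
    List String → PySem.Dict String (List (String × (Int × Int))) → PySem.Dict String (List String) → Int → Int →
    PySem.Dict String (List (String × (Int × Int))) × PySem.Dict String (List String)
  | [], send, recv, _, _ => (send, recv)
  | t_name :: rest, send, recv, s_i, s_remain =>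
    match pyA_inner students t_name bpt bps (bpt.toNat + 1) 0 s_i s_remain [] recv with
    | (tmp, recv', s_i', s_remain') =>
      pyA_outer students bpt bps rest (send.insert t_name tmp) recv' s_i' s_remain'

def split_batch_config (batch_size : Int) (teacher_names : List String) (student_names : List String) : (List (String × List (String × (Int × Int)))) × (List (String × List String)) :=
  let n_student : Int := student_names.length
  let n_teacher : Int := teacher_names.length
  -- A's asserts raise (ZeroDivisionError / AssertionError) exactly outside Pre_
  let batch_per_student := PySem.Int.floordiv batch_size n_student
  let batch_per_teacher := PySem.Int.floordiv batch_size (max n_teacher 1)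
  let recv0 := student_names.foldl (fun d s => d.insert s ([] : List String)) PySem.Dict.empty
  let res := pyA_outer student_names batch_per_teacher batch_per_student teacher_names PySem.Dict.empty recv0 0 batch_per_student
  (res.1.items, res.2.items)

-- ===== PORT B =====
def pyB_inner (bps lo hi : Int) (t_name : String) :
    List (Int × String) → List (String × (Int × Int)) → PySem.Dict String (List String) →
    List (String × (Int × Int)) × PySem.Dict String (List String)
  | [], cfg, recv => (cfg, recv)
  | (s, s_name) :: rest, cfg, recv =>
    let start := max lo (s * bps)
    let end_ := min hi ((s + 1) * bps)
    if start < end_ then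
      -- student_recv_config[s_name].append(t_name): the key is always present (pre-initialized)
      pyB_inner bps lo hi t_name rest (cfg ++ [(s_name, (start - lo, end_ - lo))])
        (recv.modify s_name [] (fun l => l ++ [t_name]))
    else pyB_inner bps lo hi t_name rest cfg recv

def pyB_outer (students : List String) (bpt bps : Int) :
    List (Int × String) → PySem.Dict String (List (String × (Int × Int))) → PySem.Dict String (List String) →
    PySem.Dict String (List (String × (Int × Int))) × PySem.Dict String (List String)
  | [], send, recv => (send, recv)
  | (t, t_name) :: rest, send, recv =>
    let lo := t * bpt
    let hi := lo + bpt
    match pyB_inner bps lo hi t_name (PySem.List.enumerate students) [] recv with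
    | (cfg, recv') => pyB_outer students bpt bps rest (send.insert t_name cfg) recv'

def split_batch_config_alt (batch_size : Int) (teacher_names : List String) (student_names : List String) : (List (String × List (String × (Int × Int)))) × (List (String × List String)) :=
  let n_student : Int := student_names.length
  let n_teacher : Int := teacher_names.length
  let batch_per_student := PySem.Int.floordiv batch_size n_student
  let batch_per_teacher := PySem.Int.floordiv batch_size (max n_teacher 1)
  let recv0 := student_names.foldl (fun d s => d.insert s ([] : List String)) PySem.Dict.empty
  let res := pyB_outer student_names batch_per_teacher batch_per_student (PySem.List.enumerate teacher_names) PySem.Dict.empty recv0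
  (res.1.items, res.2.items)

-- ===== PRECONDITION & SPEC =====
-- Pre_ excludes exactly the inputs on which A raises: empty student list (ZeroDivisionError) and
-- batch sizes not divisible by the number of students / of teachers (AssertionError).
def Pre_split_batch_config (batch_size : Int) (teacher_names : List String) (student_names : List String) : Prop :=
  student_names ≠ [] ∧ ((student_names.length : Int) ∣ batch_size) ∧
    (teacher_names = [] ∨ ((teacher_names.length : Int) ∣ batch_size))
instance (batch_size : Int) (teacher_names : List String) (student_names : List String) : Decidable (Pre_split_batch_config batch_size teacher_names student_names) := by unfold Pre_split_batch_config; infer_instance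

def pvWitness_split_batch_config : Int × List String × List String := (6, ["t1", "t2"], ["s1", "s2", "s3"])

def Spec_split_batch_config (batch_size : Int) (teacher_names : List String) (student_names : List String) (out : (List (String × List (String × (Int × Int)))) × (List (String × List String))) : Prop := out = split_batch_config_alt batch_size teacher_names student_names
instance (batch_size : Int) (teacher_names : List String) (student_names : List String) (out : (List (String × List (String × (Int × Int)))) × (List (String × List String))) : Decidable (Spec_split_batch_config batch_size teacher_names student_names out) := by unfold Spec_split_batch_config; infer_instance

-- ===== CLAIM (what is proved, stated in full; the proofs are below) =====
def Claim_equal_split_batch_config : Prop := ∀ (batch_size : Int) (teacher_names : List String) (student_names : List String), Dom_split_batch_config batch_size teacher_names student_names → Pre_split_batch_config batch_size teacher_names student_names → Spec_split_batch_config batch_size teacher_names student_names (split_batch_config batch_size teacher_names student_names)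

-- ===== LEMMAS AND PROOFS =====

-- The per-teacher segment list both loops produce, walking the student list with its index.
def segsAux (bps lo hi : Int) : List String → Nat → List (String × (Int × Int))
  | [], _ => []
  | name :: rest, k =>
    (if max lo ((k : Int) * bps) < min hi (((k : Int) + 1) * bps)
     then [(name, (max lo ((k : Int) * bps) - lo, min hi (((k : Int) + 1) * bps) - lo))]
     else []) ++ segsAux bps lo hi rest (k + 1)

def recvStep (t_name : String) (d : PySem.Dict String (List String)) (p : String × (Int × Int)) :
    PySem.Dict String (List String) :=
  d.modify p.1 [] (fun l => l ++ [t_name])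

-- A's guarded "setdefault then append" equals a bare modify with default [].
lemma modify_of_setdefault (d : PySem.Dict String (List String)) (k : String)
    (f : List String → List String) :
    ((if d.contains k then d else d.insert k ([] : List String)).modify k [] f) = d.modify k [] f := by
  by_cases h : d.contains k = true
  · simp [PySem.Dict.modify, h]
  · have h' : d.contains k = false := by simpa using h
    simp only [PySem.Dict.modify, h', Bool.false_eq_true, if_false]
    rw [PySem.Dict.getD_insert_self, PySem.Dict.insert_insert_self,
      PySem.Dict.getD_of_not_contains d [] h']

lemma segsAux_nil_of_le (bps lo hi : Int) (hb : 0 ≤ bps) :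
    ∀ (ss : List String) (k : Nat), hi ≤ (k : Int) * bps → segsAux bps lo hi ss k = [] := by
  intro ss
  induction ss with
  | nil => intro k _; rfl
  | cons name rest ih =>
    intro k hk
    have h1 : min hi (((k : Int) + 1) * bps) ≤ max lo ((k : Int) * bps) := by
      have : hi ≤ ((k : Int) + 1) * bps := by nlinarith
      calc min hi (((k : Int) + 1) * bps) ≤ hi := min_le_left _ _
        _ ≤ (k : Int) * bps := hk
        _ ≤ max lo ((k : Int) * bps) := le_max_right _ _
    have h2 : ¬ (max lo ((k : Int) * bps) < min hi (((k : Int) + 1) * bps)) := not_lt.mpr h1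
    simp only [segsAux, h2, if_false, List.nil_append]
    exact ih (k + 1) (by push_cast; nlinarith)

lemma segsAux_nil_of_hi_le_lo (bps lo hi : Int) (h : hi ≤ lo) :
    ∀ (ss : List String) (k : Nat), segsAux bps lo hi ss k = [] := by
  intro ss
  induction ss with
  | nil => intro k; rfl
  | cons name rest ih =>
    intro k
    have h1 : ¬ (max lo ((k : Int) * bps) < min hi (((k : Int) + 1) * bps)) := by
      have : min hi (((k : Int) + 1) * bps) ≤ max lo ((k : Int) * bps) :=
        le_trans (le_trans (min_le_left _ _) h) (le_max_left _ _)
      exact not_lt.mpr this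
    simp only [segsAux, h1, if_false, List.nil_append]
    exact ih (k + 1)

lemma segsAux_drop_prefix (bps lo hi : Int) (hb : 0 < bps) (i : Nat) (hlo : (i : Int) * bps ≤ lo) :
    ∀ (d : Nat) (ss : List String) (k : Nat), k + d = i →
      segsAux bps lo hi ss k = segsAux bps lo hi (ss.drop d) (k + d) := by
  intro d
  induction d with
  | zero => intro ss k _; simp
  | succ d ih =>
    intro ss k hk
    cases ss with
    | nil => simp [segsAux]
    | cons name rest =>
      have hk1 : ((k : Int) + 1) * bps ≤ lo := by
        have : ((k : Int) + 1) ≤ (i : Int) := by exact_mod_cast Nat.succ_le_of_lt (by omega)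
        nlinarith
      have h1 : ¬ (max lo ((k : Int) * bps) < min hi (((k : Int) + 1) * bps)) := by
        have : min hi (((k : Int) + 1) * bps) ≤ max lo ((k : Int) * bps) :=
          le_trans (le_trans (min_le_right _ _) hk1) (le_max_left _ _)
        exact not_lt.mpr this
      have := ih rest (k + 1) (by omega)
      simp only [segsAux, h1, if_false, List.nil_append]
      rw [this]
      have : k + 1 + d = k + (d + 1) := by omega
      simp [this]

-- B's inner loop over the enumerated students is an append of segsAux plus a recvStep fold.
lemma B_inner_eq (bps lo hi : Int) (tn : String) :
    ∀ (ss : List String) (k : Nat) (cfg : List (String × (Int × Int)))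
      (recv : PySem.Dict String (List String)),
      pyB_inner bps lo hi tn (PySem.List.enumerate ss (k : Int)) cfg recv =
        (cfg ++ segsAux bps lo hi ss k,
         (segsAux bps lo hi ss k).foldl (recvStep tn) recv) := by
  intro ss
  induction ss with
  | nil => intro k cfg recv; simp [PySem.List.enumerate, pyB_inner, segsAux]
  | cons name rest ih =>
    intro k cfg recv
    rw [PySem.List.enumerate_cons]
    by_cases h : max lo ((k : Int) * bps) < min hi (((k : Int) + 1) * bps)
    · simp only [pyB_inner, h, if_true]
      have hcast : ((k : Int) + 1) = ((k + 1 : Nat) : Int) := by push_cast; ring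
      rw [hcast, ih (k + 1)]
      simp only [segsAux, ← hcast, h, if_true, List.singleton_append, List.foldl_cons]
      simp [recvStep, List.append_assoc]
    · simp only [pyB_inner, h, if_false]
      have hcast : ((k : Int) + 1) = ((k + 1 : Nat) : Int) := by push_cast; ring
      rw [hcast, ih (k + 1)]
      simp [segsAux, h]

-- A's inner while-loop produces the same segments (from the current student on) and folds the
-- same recvStep; it ends in a state satisfying the next teacher's entry invariant.
lemma A_inner_eq (students : List String) (tn : String) (bps bpt lo : Int)
    (hbps : 0 < bps) (hbpt : 0 < bpt)
    (hhi : lo + bpt ≤ (students.length : Int) * bps) :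
    ∀ (fuel : Nat) (c r : Int) (i : Nat) (tmp : List (String × (Int × Int)))
      (recv : PySem.Dict String (List String)),
      (bpt - c).toNat < fuel →
      (i : Int) * bps + bps - r = lo + c → 0 < r → r ≤ bps → 0 ≤ c → c ≤ bpt → (0 < c → r = bps) →
      ∃ (i' : Nat) (r' : Int),
        pyA_inner students tn bpt bps fuel c i r tmp recv =
          (tmp ++ segsAux bps lo (lo + bpt) (students.drop i) i,
           (segsAux bps lo (lo + bpt) (students.drop i) i).foldl (recvStep tn) recv,
           (i' : Int), r')
        ∧ (i' : Int) * bps + bps - r' = lo + bpt ∧ 0 < r' ∧ r' ≤ bps := by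
  intro fuel
  induction fuel with
  | zero => intro c r i tmp recv hfuel _ _ _ _ _ _; omega
  | succ fuel ih =>
    intro c r i tmp recv hfuel hinv hr0 hrb hc0 hcb hcr
    have hibps : (i : Int) * bps = lo + c - (bps - r) := by linarith
    by_cases hc : c < bpt
    · have hiN : (i : Int) * bps < (students.length : Int) * bps := by nlinarith
      have hilt : i < students.length := by
        have h1 : (i : Int) < (students.length : Int) := lt_of_mul_lt_mul_right hiN (le_of_lt hbps)
        exact_mod_cast h1
      have hdrop : students.drop i = students[i] :: students.drop (i + 1) :=
        (List.getElem_cons_drop hilt).symm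
      have hname : (PySem.List.pyGet? students (i : Int)).getD "" = students[i] := by
        simp [List.getElem?_eq_getElem hilt]
      have hi1bps : ((i : Int) + 1) * bps = lo + c + r := by nlinarith
      have hst : max lo ((i : Int) * bps) = lo + c := by
        by_cases hcz : c = 0
        · omega
        · have hrbps : r = bps := hcr (lt_of_le_of_ne hc0 (Ne.symm hcz))
          omega
      have hen : min (lo + bpt) (((i : Int) + 1) * bps) = lo + min bpt (c + r) := by
        rw [hi1bps]; omega
      have hcond : max lo ((i : Int) * bps) < min (lo + bpt) (((i : Int) + 1) * bps) := by
        rw [hst, hen]; omega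
      have hend : (if c + r > bpt then bpt else c + r) = min bpt (c + r) := by
        split_ifs <;> omega
      have hsegs : segsAux bps lo (lo + bpt) (students.drop i) i =
          (students[i], (c, min bpt (c + r))) :: segsAux bps lo (lo + bpt) (students.drop (i + 1)) (i + 1) := by
        rw [hdrop]
        simp only [segsAux, hst, hen]
        simp [hc, hr0]
      simp only [pyA_inner, if_pos hc, hname, hend, modify_of_setdefault]
      by_cases hz : r - (min bpt (c + r) - c) = 0
      · have hE : min bpt (c + r) = c + r := by omega
        have hcast : (i : Int) + 1 = ((i + 1 : Nat) : Int) := by push_cast; ring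
        have harg : c + (min bpt (c + r) - c) = c + r := by omega
        rw [if_pos hz, harg, hcast]
        obtain ⟨i', r', heq, hex1, hex2, hex3⟩ :=
          ih (c + r) bps (i + 1) (tmp ++ [(students[i], (c, min bpt (c + r)))])
            (recv.modify students[i] [] (fun l => l ++ [tn]))
            (by omega) (by push_cast; linarith) hbps le_rfl (by omega) (by omega)
            (fun _ => rfl)
        refine ⟨i', r', ?_, hex1, hex2, hex3⟩
        rw [heq, hsegs]
        simp [recvStep, List.append_assoc]
      · have hE : min bpt (c + r) = bpt := by omega
        have hcr2 : bpt < c + r := by omega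
        have harg : c + (min bpt (c + r) - c) = bpt := by omega
        rw [if_neg hz, harg]
        have hfe : 1 ≤ fuel := by omega
        obtain ⟨f, rfl⟩ : ∃ f, fuel = f + 1 := ⟨fuel - 1, by omega⟩
        have htail : segsAux bps lo (lo + bpt) (students.drop (i + 1)) (i + 1) = [] := by
          apply segsAux_nil_of_le bps lo (lo + bpt) (le_of_lt hbps)
          push_cast; linarith
        refine ⟨i, r - (min bpt (c + r) - c), ?_, by omega, by omega, by omega⟩
        simp only [pyA_inner, lt_irrefl, if_false]
        rw [hsegs, htail]
        simp [recvStep]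
    · have hceq : c = bpt := by omega
      have hrbps : r = bps := hcr (by omega)
      have hsegs : segsAux bps lo (lo + bpt) (students.drop i) i = [] := by
        apply segsAux_nil_of_le bps lo (lo + bpt) (le_of_lt hbps)
        omega
      refine ⟨i, r, ?_, by omega, hr0, hrb⟩
      simp only [pyA_inner, if_neg hc]
      rw [hsegs]
      simp

-- Outer loops agree, positive case.
lemma outer_pos (students : List String) (bps bpt : Int) (hbps : 0 < bps) (hbpt : 0 < bpt) :
    ∀ (tl : List String) (t : Nat) (send : PySem.Dict String (List (String × (Int × Int))))
      (recv : PySem.Dict String (List String)) (i : Nat) (r : Int),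
      ((t : Int) + tl.length) * bpt ≤ (students.length : Int) * bps →
      (i : Int) * bps + bps - r = (t : Int) * bpt → 0 < r → r ≤ bps →
      pyA_outer students bpt bps tl send recv (i : Int) r =
        pyB_outer students bpt bps (PySem.List.enumerate tl (t : Int)) send recv := by
  intro tl
  induction tl with
  | nil => intro t send recv i r _ _ _ _; rfl
  | cons t_name rest ihtl =>
    intro t send recv i r hN hinv hr0 hrb
    rw [PySem.List.enumerate_cons]
    have hlen : ((t : Int) + ((rest.length : Int) + 1)) * bpt ≤ (students.length : Int) * bps := by
      have := hN
      simp only [List.length_cons] at this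
      push_cast at this
      linarith
    have hhi : (t : Int) * bpt + bpt ≤ (students.length : Int) * bps := by nlinarith
    obtain ⟨i', r', heq, hex1, hex2, hex3⟩ :=
      A_inner_eq students t_name bps bpt ((t : Int) * bpt) hbps hbpt hhi (bpt.toNat + 1) 0 r i [] recv
        (by omega) (by rw [hinv]; ring) hr0 hrb le_rfl (le_of_lt hbpt)
        (fun h => absurd h (lt_irrefl 0))
    have hBin := B_inner_eq bps ((t : Int) * bpt) ((t : Int) * bpt + bpt) t_name students 0
      [] recv
    simp only [Nat.cast_zero] at hBin
    have hpre : segsAux bps ((t : Int) * bpt) ((t : Int) * bpt + bpt) students 0 =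
        segsAux bps ((t : Int) * bpt) ((t : Int) * bpt + bpt) (students.drop i) i := by
      have h0 : (0 : Nat) + i = i := by omega
      have := segsAux_drop_prefix bps ((t : Int) * bpt) ((t : Int) * bpt + bpt) hbps i
        (by omega) i students 0 h0
      rw [this, h0]
    simp only [pyA_outer, pyB_outer, heq, hBin, hpre, List.nil_append]
    have hcast : (t : Int) + 1 = ((t + 1 : Nat) : Int) := by push_cast; ring
    rw [hcast]
    apply ihtl (t + 1) _ _ i' r'
    · push_cast
      simp only [List.length_cons] at hN
      push_cast at hN
      linarith
    · push_cast
      linarith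
    · exact hex2
    · exact hex3

-- Outer loops agree, bpt ≤ 0: no segments at all on either side.
lemma outer_nonpos (students : List String) (bps bpt : Int) (hbpt : bpt ≤ 0) :
    ∀ (tl : List String) (t : Nat) (send : PySem.Dict String (List (String × (Int × Int))))
      (recv : PySem.Dict String (List String)) (i r : Int),
      pyA_outer students bpt bps tl send recv i r =
        pyB_outer students bpt bps (PySem.List.enumerate tl (t : Int)) send recv := by
  intro tl
  induction tl with
  | nil => intro t send recv i r; rfl
  | cons t_name rest ihtl =>
    intro t send recv i r
    rw [PySem.List.enumerate_cons]
    have hA : pyA_inner students t_name bpt bps (bpt.toNat + 1) 0 i r [] recv =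
        ([], recv, i, r) := by
      simp only [pyA_inner]
      rw [if_neg (by omega)]
    have hBin := B_inner_eq bps ((t : Int) * bpt) ((t : Int) * bpt + bpt) t_name students 0
      [] recv
    simp only [Nat.cast_zero] at hBin
    have hsegs : segsAux bps ((t : Int) * bpt) ((t : Int) * bpt + bpt) students 0 = [] :=
      segsAux_nil_of_hi_le_lo bps ((t : Int) * bpt) ((t : Int) * bpt + bpt) (by omega) students 0
    rw [hsegs] at hBin
    simp only [List.nil_append, List.foldl_nil] at hBin
    simp only [pyA_outer, pyB_outer, hA, hBin]
    have hcast : (t : Int) + 1 = ((t + 1 : Nat) : Int) := by push_cast; ring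
    rw [hcast]
    exact ihtl (t + 1) _ _ i r

-- ===== VERDICT (by name: the statement is the Claim_ definition above) =====
-- Main agreement lemma: the two ports agree on every input Pre_ admits.
lemma main_eq (batch_size : Int) (teacher_names : List String) (student_names : List String)
    (hpre : Pre_split_batch_config batch_size teacher_names student_names) :
    split_batch_config batch_size teacher_names student_names =
      split_batch_config_alt batch_size teacher_names student_names := by
  obtain ⟨hne, hdvd, hteach⟩ := hpre
  have hnS : 0 < (student_names.length : Int) := by
    have : 0 < student_names.length := List.length_pos_iff.mpr hne
    exact_mod_cast this
  simp only [split_batch_config, split_batch_config_alt]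
  rcases eq_or_ne teacher_names [] with hT0 | hTne
  · subst hT0; rfl
  · have hTdvd : ((teacher_names.length : Int)) ∣ batch_size := hteach.resolve_left hTne
    have hnT : 0 < (teacher_names.length : Int) := by
      have : 0 < teacher_names.length := List.length_pos_iff.mpr hTne
      exact_mod_cast this
    have hmax : max (teacher_names.length : Int) 1 = (teacher_names.length : Int) :=
      max_eq_left (by omega)
    rw [hmax, PySem.Int.floordiv_eq_ediv_of_pos hnS, PySem.Int.floordiv_eq_ediv_of_pos hnT]
    have hbs_eq : (student_names.length : Int) * (batch_size / (student_names.length : Int)) =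
        batch_size := Int.mul_ediv_cancel' hdvd
    have hbt_eq : (teacher_names.length : Int) * (batch_size / (teacher_names.length : Int)) =
        batch_size := Int.mul_ediv_cancel' hTdvd
    by_cases hbs : 0 < batch_size
    · have hbps_pos : 0 < batch_size / (student_names.length : Int) := by
        by_contra h
        have h2 := not_lt.mp h
        nlinarith
      have hbpt_pos : 0 < batch_size / (teacher_names.length : Int) := by
        by_contra h
        have h2 := not_lt.mp h
        nlinarith
      have := outer_pos student_names (batch_size / (student_names.length : Int))
        (batch_size / (teacher_names.length : Int)) hbps_pos hbpt_pos teacher_names 0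
        PySem.Dict.empty
        (student_names.foldl (fun d s => d.insert s ([] : List String)) PySem.Dict.empty)
        0 (batch_size / (student_names.length : Int))
        (by push_cast; rw [zero_add, hbt_eq, hbs_eq])
        (by push_cast; ring)
        hbps_pos le_rfl
      simp only [Nat.cast_zero] at this
      rw [this]
    · have hbpt_np : batch_size / (teacher_names.length : Int) ≤ 0 := by
        by_contra h
        have h2 := not_le.mp h
        nlinarith
      have := outer_nonpos student_names (batch_size / (student_names.length : Int))
        (batch_size / (teacher_names.length : Int)) hbpt_np teacher_names 0
        PySem.Dict.empty
        (student_names.foldl (fun d s => d.insert s ([] : List String)) PySem.Dict.empty)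
        0 (batch_size / (student_names.length : Int))
      simp only [Nat.cast_zero] at this
      rw [this]

theorem split_batch_config_spec : Claim_equal_split_batch_config := by
  unfold Claim_equal_split_batch_config
  intro batch_size teacher_names student_names _ hpre
  unfold Spec_split_batch_config
  exact main_eq batch_size teacher_names student_names hpre
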